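-- pv_equiv track=rewrite | github.com/eth-sri/DeepT | Robustness-Verification-for-Transformers/compute_neurons.py | compute_neurons
-- ===== SOURCE A (Python) =====
-- def compute_neurons(N: int, E: int, H: int, A: int, num_blocks: int, our_softmax: bool):
--     num_neurons = 0
--     d_v = E
--     d_k = E // A
--
--     num_neurons += N * E  # Layer norm ()
--     num_neurons += N * E  # Layer Normalization - "(N, E)"
--
--     for j in range(num_blocks):
--         for i in range(A):
--             num_neurons += N * d_k  # Keys - "(N, d_k)"
--             num_neurons += N * d_k  # Queries - "(N, d_k)"
--             num_neurons += N * d_v  # Values - "(N, d_v)"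
--             num_neurons += N * N  # Attention Scores - "(N, N)"
--
--             if our_softmax:
--                 num_neurons += N * N * N  # Softmax - Diffs - "(N, N, N)
--                 num_neurons += N * N * N  # Softmax - Diffs Exp - "(N, N, N)
--                 num_neurons += N * N  # Softmax - Diffs Exp Sum - "(N, N)"
--                 num_neurons += N * N  # Softmax - result = attention probs - "(N, N)"
--             else: # Normal softmax
--                 num_neurons += N * N  # Softmax - Exps - "(N, N)"
--                 num_neurons += N * N  # Softmax - Exp Sums - "(N)"
--                 num_neurons += N * N  # Softmax - Ratio - "(N, N)"
--
--
--             num_neurons += N * d_v  # Self-attention-output - "(N, d_v)"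
--
--         num_neurons += N * E  # Residual connection - "(N, E)"
--         num_neurons += N * E  # Layer Norm - "(N, E)"
--         num_neurons += N * H  # Projection 1 - "(N, E_2)"
--         num_neurons += N * H  # Relu - "(N, E_2)"
--         num_neurons += N * E  # Projection 2 - "(N, E)"
--         num_neurons += N * E  # Residual connection - "(N, E)"
--         num_neurons += N * E  # Layer Norm - "(N, E)"
--
--     num_neurons += E  # Pooling - Dense,(E)
--     num_neurons += E  # Pooling - Tanh,(E)
--     num_neurons += 2  # Classifier,2
--     return num_neurons
-- ===== SOURCE B (Python) =====
-- def compute_neurons(N: int, E: int, H: int, A: int, num_blocks: int, our_softmax: bool):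
--     # Closed form: the loops add constant amounts per iteration, so multiply by loop counts.
--     d_k = E // A
--     per_head = 2 * (N * d_k) + 2 * (N * E) + N * N + (
--         2 * (N * N * N) + 2 * (N * N) if our_softmax else 3 * (N * N))
--     per_block = max(A, 0) * per_head + 5 * (N * E) + 2 * (N * H)
--     return 2 * (N * E) + max(num_blocks, 0) * per_block + 2 * E + 2
-- ===== Notes on version B (the rewrite author's own statement) =====
-- stated objective: faster
-- what changed: Replaced the nested num_blocks x A accumulation loops by a closed-form arithmetic expression multiplying the constant per-head and per-block contributions by the (clamped) loop counts.
import Mathlib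
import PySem

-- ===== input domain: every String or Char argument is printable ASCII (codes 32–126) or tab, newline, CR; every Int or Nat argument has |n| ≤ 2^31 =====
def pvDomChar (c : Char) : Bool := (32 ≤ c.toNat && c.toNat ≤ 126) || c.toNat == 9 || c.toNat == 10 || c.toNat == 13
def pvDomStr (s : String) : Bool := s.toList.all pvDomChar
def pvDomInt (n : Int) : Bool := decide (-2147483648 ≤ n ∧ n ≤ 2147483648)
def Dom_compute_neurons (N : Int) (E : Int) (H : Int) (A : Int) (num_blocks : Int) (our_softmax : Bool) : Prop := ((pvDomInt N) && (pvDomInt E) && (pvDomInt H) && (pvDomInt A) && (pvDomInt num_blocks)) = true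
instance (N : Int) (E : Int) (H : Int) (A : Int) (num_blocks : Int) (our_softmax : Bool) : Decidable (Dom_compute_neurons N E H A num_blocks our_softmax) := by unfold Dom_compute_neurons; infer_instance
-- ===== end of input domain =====

-- ===== PORT A =====
def compute_neurons (N : Int) (E : Int) (H : Int) (A : Int) (num_blocks : Int) (our_softmax : Bool) : Int :=
  let d_v := E
  let d_k := PySem.Int.floordiv E A
  let n0 : Int := 0 + N * E + N * E
  let n1 := (PySem.List.pyRange 0 num_blocks 1).foldl (fun acc _ =>
    let acc2 := (PySem.List.pyRange 0 A 1).foldl (fun a _ =>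
      let a1 := a + N * d_k + N * d_k + N * d_v + N * N
      let a2 := if our_softmax then a1 + N * N * N + N * N * N + N * N + N * N
                else a1 + N * N + N * N + N * N
      a2 + N * d_v) acc
    acc2 + N * E + N * E + N * H + N * H + N * E + N * E + N * E) n0
  n1 + E + E + 2

-- ===== PORT B =====
def compute_neurons_alt (N : Int) (E : Int) (H : Int) (A : Int) (num_blocks : Int) (our_softmax : Bool) : Int :=
  let d_k := PySem.Int.floordiv E A
  let per_head := 2 * (N * d_k) + 2 * (N * E) + N * N +
    (if our_softmax then 2 * (N * N * N) + 2 * (N * N) else 3 * (N * N))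
  let per_block := (max A 0) * per_head + 5 * (N * E) + 2 * (N * H)
  2 * (N * E) + (max num_blocks 0) * per_block + 2 * E + 2

-- ===== PRECONDITION & SPEC =====
-- Pre_ excludes A = 0, on which Python A raises ZeroDivisionError at 'E // A'.
def Pre_compute_neurons (N : Int) (E : Int) (H : Int) (A : Int) (num_blocks : Int) (our_softmax : Bool) : Prop := A ≠ 0
instance (N : Int) (E : Int) (H : Int) (A : Int) (num_blocks : Int) (our_softmax : Bool) : Decidable (Pre_compute_neurons N E H A num_blocks our_softmax) := by unfold Pre_compute_neurons; infer_instance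
def pvWitness_compute_neurons : Int × Int × Int × Int × Int × Bool := (2, 4, 3, 2, 2, true)
def Spec_compute_neurons (N : Int) (E : Int) (H : Int) (A : Int) (num_blocks : Int) (our_softmax : Bool) (out : Int) : Prop := out = compute_neurons_alt N E H A num_blocks our_softmax
instance (N : Int) (E : Int) (H : Int) (A : Int) (num_blocks : Int) (our_softmax : Bool) (out : Int) : Decidable (Spec_compute_neurons N E H A num_blocks our_softmax out) := by unfold Spec_compute_neurons; infer_instance

-- ===== CLAIM (what is proved, stated in full; the proofs are below) =====
def Claim_equal_compute_neurons : Prop := ∀ (N : Int) (E : Int) (H : Int) (A : Int) (num_blocks : Int) (our_softmax : Bool), Dom_compute_neurons N E H A num_blocks our_softmax → Pre_compute_neurons N E H A num_blocks our_softmax → Spec_compute_neurons N E H A num_blocks our_softmax (compute_neurons N E H A num_blocks our_softmax)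

-- ===== LEMMAS AND PROOFS =====

-- folding a constant increment over a list adds length * constant
theorem pv_foldl_const (l : List Int) (C : Int) (init : Int) :
    l.foldl (fun a _ => a + C) init = init + l.length * C := by
  induction l generalizing init with
  | nil => simp
  | cons x xs ih => simp [List.foldl, ih]; ring

theorem pv_len_range (n : Int) : ((PySem.List.pyRange 0 n 1).length : Int) = max n 0 := by
  rw [PySem.List.length_pyRange_one]
  omega

-- ===== VERDICT (by name: the statement is the Claim_ definition above) =====
theorem compute_neurons_spec : Claim_equal_compute_neurons := by
  intro N E H A num_blocks our_softmax _ _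
  unfold Spec_compute_neurons compute_neurons compute_neurons_alt
  set d_k := PySem.Int.floordiv E A with hdk
  have hinner : ∀ (init : Int),
      (PySem.List.pyRange 0 A 1).foldl (fun a _ =>
        let a1 := a + N * d_k + N * d_k + N * E + N * N
        let a2 := if our_softmax then a1 + N * N * N + N * N * N + N * N + N * N
                  else a1 + N * N + N * N + N * N
        a2 + N * E) init
      = init + (max A 0) * (2 * (N * d_k) + 2 * (N * E) + N * N +
          (if our_softmax then 2 * (N * N * N) + 2 * (N * N) else 3 * (N * N))) := by
    intro init
    have hstep : (fun (a : Int) (_ : Int) =>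
        let a1 := a + N * d_k + N * d_k + N * E + N * N
        let a2 := if our_softmax then a1 + N * N * N + N * N * N + N * N + N * N
                  else a1 + N * N + N * N + N * N
        a2 + N * E)
      = (fun (a : Int) (_ : Int) => a + (2 * (N * d_k) + 2 * (N * E) + N * N +
          (if our_softmax then 2 * (N * N * N) + 2 * (N * N) else 3 * (N * N)))) := by
      funext a x
      cases our_softmax <;> simp <;> ring
    rw [hstep, pv_foldl_const]
    rw [show ((PySem.List.pyRange 0 A 1).length : Int) * _ = _ from by rw [pv_len_range]]
  simp only [hinner]
  have houter := pv_foldl_const (PySem.List.pyRange 0 num_blocks 1)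
      ((max A 0) * (2 * (N * d_k) + 2 * (N * E) + N * N +
          (if our_softmax then 2 * (N * N * N) + 2 * (N * N) else 3 * (N * N)))
        + N * E + N * E + N * H + N * H + N * E + N * E + N * E)
      (0 + N * E + N * E)
  have hstep2 : (fun (acc : Int) (_ : Int) =>
      acc + (max A 0) * (2 * (N * d_k) + 2 * (N * E) + N * N +
          (if our_softmax then 2 * (N * N * N) + 2 * (N * N) else 3 * (N * N)))
        + N * E + N * E + N * H + N * H + N * E + N * E + N * E)
    = (fun (acc : Int) (_ : Int) =>
      acc + ((max A 0) * (2 * (N * d_k) + 2 * (N * E) + N * N +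
          (if our_softmax then 2 * (N * N * N) + 2 * (N * N) else 3 * (N * N)))
        + N * E + N * E + N * H + N * H + N * E + N * E + N * E)) := by
    funext a x; ring
  rw [hstep2, pv_foldl_const]
  cases our_softmax <;> simp <;> ring
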